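-- pv_equiv track=rewrite | github.com/Miamiamiamyt/algorithms | 算法/大作业/生成索引.py | Move_To_Right
-- ===== SOURCE A (Python) =====
-- def Move_To_Right(S):
-- 	SS=S#记录初始状态
-- 	#result=[]
-- 	#result.append(SS)
-- 	result={}
-- 	result[SS]=0
-- 	#suffix_array.append(0)
-- 	for j in range(len(SS)-1):
-- 		temp = SS[0]
-- 		SS = SS[1:] + temp
-- 		#result.append(SS)
-- 		#suffix_array.append(j+1)
-- 		result[SS]=j+1
-- 	return result
-- ===== SOURCE B (Python) =====
-- def Move_To_Right(S):
-- 	result = {S: 0}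
-- 	for i in range(1, len(S)):
-- 		result[S[i:] + S[:i]] = i
-- 	return result
-- ===== Notes on version B (the rewrite author's own statement) =====
-- stated objective: simpler
-- what changed: Each rotation is computed directly from its index as S[i:]+S[:i] over a dict literal start, replacing A's mutated running-string accumulator SS=SS[1:]+SS[0] and shifted loop index.
import Mathlib
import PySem

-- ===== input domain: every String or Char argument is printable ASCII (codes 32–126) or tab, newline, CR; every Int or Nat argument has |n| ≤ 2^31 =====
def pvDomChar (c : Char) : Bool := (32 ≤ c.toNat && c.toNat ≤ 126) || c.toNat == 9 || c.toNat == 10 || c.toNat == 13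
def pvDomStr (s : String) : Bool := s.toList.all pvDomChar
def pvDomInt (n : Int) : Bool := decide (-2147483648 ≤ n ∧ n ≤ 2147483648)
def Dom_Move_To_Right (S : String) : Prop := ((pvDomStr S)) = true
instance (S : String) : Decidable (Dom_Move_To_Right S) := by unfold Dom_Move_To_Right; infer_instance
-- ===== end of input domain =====

-- B computes each rotation directly from its index as S[i:]+S[:i], replacing A's mutated running-string
-- accumulator SS = SS[1:] + SS[0] (objective: simpler decomposition; same return value).
-- String concatenation/slicing is ported over code points (List Char) with String.mk, exact for Python str.

-- ===== PORT A =====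
-- loop body: temp = SS[0]; SS = SS[1:] + temp; result[SS] = j+1  (the 'none' branch is an unreachable totality guard for SS[0])
def pvStepA (st : List Char × PySem.Dict String Int) (j : Int) : List Char × PySem.Dict String Int :=
  match PySem.List.pyGet? st.1 0 with
  | none => st
  | some temp =>
      let SS := PySem.List.slice st.1 (some 1) none ++ [temp]
      (SS, st.2.insert (String.mk SS) (j + 1))

def Move_To_Right (S : String) : List (String × Int) :=
  let SS := S.toList
  let result := (PySem.Dict.empty : PySem.Dict String Int).insert S 0
  ((PySem.List.pyRange 0 ((SS.length : Int) - 1) 1).foldl pvStepA (SS, result)).2.items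

-- ===== PORT B =====
-- loop body: result[S[i:] + S[:i]] = i
def pvStepB (cs : List Char) (d : PySem.Dict String Int) (i : Int) : PySem.Dict String Int :=
  d.insert (String.mk (PySem.List.slice cs (some i) none ++ PySem.List.slice cs none (some i))) i

def Move_To_Right_alt (S : String) : List (String × Int) :=
  let cs := S.toList
  ((PySem.List.pyRange 1 (cs.length : Int) 1).foldl (pvStepB cs)
    ((PySem.Dict.empty : PySem.Dict String Int).insert S 0)).items

-- ===== PRECONDITION & SPEC =====
def Spec_Move_To_Right (S : String) (out : List (String × Int)) : Prop := out = Move_To_Right_alt S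
instance (S : String) (out : List (String × Int)) : Decidable (Spec_Move_To_Right S out) := by unfold Spec_Move_To_Right; infer_instance

-- ===== CLAIM (what is proved, stated in full; the proofs are below) =====
def Claim_equal_Move_To_Right : Prop := ∀ (S : String), Dom_Move_To_Right S → Spec_Move_To_Right S (Move_To_Right S)

-- ===== LEMMAS AND PROOFS =====

/-- rotation of `cs` by `k`: what A's running string `SS` holds after `k` iterations. -/
def pvRot (cs : List Char) (k : Nat) : List Char := cs.drop k ++ cs.take k

set_option maxRecDepth 4000 in
lemma pvStepA_rot (cs : List Char) (k : Nat) (hk : k < cs.length)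
    (d : PySem.Dict String Int) (j : Int) :
    pvStepA (pvRot cs k, d) j
      = (pvRot cs (k + 1), d.insert (String.mk (pvRot cs (k + 1))) (j + 1)) := by
  have hdrop : cs.drop k = cs[k] :: cs.drop (k + 1) := List.drop_eq_getElem_cons hk
  have hrot : pvRot cs k = cs[k] :: (cs.drop (k + 1) ++ cs.take k) := by
    rw [pvRot, hdrop, List.cons_append]
  have hget : PySem.List.pyGet? (cs[k] :: (cs.drop (k + 1) ++ cs.take k)) 0 = some cs[k] := by
    have hc : (0:Int) ≤ ((cs.length - (k+1) : Nat) : Int) + min (k : Int) (cs.length : Int) := by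
      omega
    simp [PySem.List.pyGet?, PySem.List.pyIdx?, hc]
  have e : pvRot cs (k + 1) = cs.drop (k + 1) ++ (cs.take k ++ [cs[k]]) := by
    rw [pvRot, List.take_add_one, List.getElem?_eq_getElem hk]
    simp
  simp only [pvStepA, hrot, hget, PySem.List.slice_from_one, e, List.tail_cons,
    List.append_assoc]

/-- main loop invariant: from step `k` on, A's fold (state = rotation by `k` plus the dict) produces
    the same dict as B's fold over the remaining indices `k+1 … n-1`. -/
lemma pv_loop_eq (cs : List Char) :
    ∀ (m k : Nat) (d : PySem.Dict String Int), k + m + 1 = cs.length →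
      (PySem.List.pyRange (k : Int) ((cs.length : Int) - 1) 1).foldl pvStepA (pvRot cs k, d)
        = (pvRot cs (cs.length - 1),
           (PySem.List.pyRange ((k : Int) + 1) (cs.length : Int) 1).foldl (pvStepB cs) d) := by
  intro m
  induction m with
  | zero =>
      intro k d hk
      rw [show PySem.List.pyRange (k : Int) ((cs.length : Int) - 1) 1 = [] from
            PySem.List.pyRange_one_eq_nil (by omega),
          show PySem.List.pyRange ((k : Int) + 1) (cs.length : Int) 1 = [] from
            PySem.List.pyRange_one_eq_nil (by omega)]
      simp only [List.foldl_nil]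
      have hk' : k = cs.length - 1 := by omega
      rw [hk']
  | succ m ih =>
      intro k d hk
      rw [show PySem.List.pyRange (k : Int) ((cs.length : Int) - 1) 1
              = (k : Int) :: PySem.List.pyRange ((k : Int) + 1) ((cs.length : Int) - 1) 1 from
            PySem.List.pyRange_one_cons (by omega),
          show PySem.List.pyRange ((k : Int) + 1) (cs.length : Int) 1
              = ((k : Int) + 1) :: PySem.List.pyRange ((k : Int) + 1 + 1) (cs.length : Int) 1 from
            PySem.List.pyRange_one_cons (by omega)]
      simp only [List.foldl_cons]
      rw [pvStepA_rot cs k (by omega)]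
      have hB : pvStepB cs d ((k : Int) + 1)
          = d.insert (String.mk (pvRot cs (k + 1))) ((k : Int) + 1) := by
        have h1 : ((k : Int) + 1) = (((k + 1 : Nat) : Int)) := by push_cast; ring
        rw [pvStepB, h1, PySem.List.slice_from_natCast, PySem.List.slice_to_natCast]
        rfl
      rw [← hB]
      have ih' := ih (k + 1) (pvStepB cs d ((k : Int) + 1)) (by omega)
      push_cast at ih'
      rw [ih']

-- ===== VERDICT (by name: the statement is the Claim_ definition above) =====
theorem Move_To_Right_spec : Claim_equal_Move_To_Right := by
  intro S _
  unfold Spec_Move_To_Right Move_To_Right Move_To_Right_alt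
  dsimp only
  by_cases h : S.toList = []
  · rw [h]
    simp only [List.length_nil, Nat.cast_zero]
    rw [show PySem.List.pyRange 0 ((0 : Int) - 1) 1 = [] from PySem.List.pyRange_one_eq_nil (by omega),
        show PySem.List.pyRange 1 (0 : Int) 1 = [] from PySem.List.pyRange_one_eq_nil (by omega)]
    rfl
  · have hlen : 1 ≤ S.toList.length := List.length_pos_of_ne_nil h
    have h0 : pvRot S.toList 0 = S.toList := by simp [pvRot]
    have key := pv_loop_eq S.toList (S.toList.length - 1) 0
      ((PySem.Dict.empty : PySem.Dict String Int).insert S 0) (by omega)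
    rw [h0] at key
    simp only [Nat.cast_zero, zero_add] at key
    rw [key]
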